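-- pv_equiv track=rewrite | github.com/thafisG/python_scripts | lista05_recursao/the_witcher.py | login_usuario
-- ===== SOURCE A (Python) =====
-- def login_usuario(entrada_codigo):
--     login = []
--     for numero in entrada_codigo:
--         somatorio = 0
--         for i in range(numero, -1, -1):
--             if i % 2 == 0:
--                 somatorio += i * 2
--             else:
--                 somatorio += i * 3
--         login.append(somatorio)
--
--     return login
-- ===== SOURCE B (Python) =====
-- def login_usuario(entrada_codigo):
--     # Closed-form arithmetic-series evaluation of the weighted sum, O(1) per element.
--     return [2 * (n // 2) * (n // 2 + 1) + 3 * ((n + 1) // 2) ** 2 if n >= 0 else 0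
--             for n in entrada_codigo]
-- ===== Notes on version B (the rewrite author's own statement) =====
-- stated objective: faster
-- what changed: Replaced the per-element countdown loop over range(numero,-1,-1) with closed-form arithmetic-series formulas (even part 2k(k+1), odd part 3m^2), making each element O(1).
import Mathlib
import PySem

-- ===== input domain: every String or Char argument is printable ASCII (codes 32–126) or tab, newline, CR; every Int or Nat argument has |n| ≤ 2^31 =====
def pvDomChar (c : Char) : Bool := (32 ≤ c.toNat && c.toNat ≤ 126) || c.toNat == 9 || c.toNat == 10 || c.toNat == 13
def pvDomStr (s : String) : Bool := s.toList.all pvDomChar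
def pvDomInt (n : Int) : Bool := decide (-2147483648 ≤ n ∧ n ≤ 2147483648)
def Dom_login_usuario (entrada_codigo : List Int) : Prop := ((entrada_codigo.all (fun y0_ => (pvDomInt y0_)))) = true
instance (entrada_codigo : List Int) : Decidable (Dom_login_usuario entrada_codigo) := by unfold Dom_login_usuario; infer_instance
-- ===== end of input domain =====

-- B replaces A's O(numero) countdown loop per element by closed-form series formulas (objective: faster, asymptotic).

-- ===== PORT A =====
-- inner loop of A: for i in range(numero, -1, -1): somatorio += i*2 if even else i*3
def pvSomatorio (numero : Int) : Int :=
  (PySem.List.pyRange numero (-1) (-1)).foldl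
    (fun somatorio i => if PySem.Int.mod i 2 == 0 then somatorio + i * 2 else somatorio + i * 3) 0

def login_usuario (entrada_codigo : List Int) : List Int :=
  entrada_codigo.foldl (fun login numero => login ++ [pvSomatorio numero]) []

-- ===== PORT B =====
def login_usuario_alt (entrada_codigo : List Int) : List Int :=
  entrada_codigo.map (fun n =>
    if n ≥ 0 then
      2 * (PySem.Int.floordiv n 2) * (PySem.Int.floordiv n 2 + 1)
        + 3 * (PySem.Int.floordiv (n + 1) 2) ^ 2
    else 0)

-- ===== PRECONDITION & SPEC =====
def Spec_login_usuario (entrada_codigo : List Int) (out : List Int) : Prop := out = login_usuario_alt entrada_codigo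
instance (entrada_codigo : List Int) (out : List Int) : Decidable (Spec_login_usuario entrada_codigo out) := by unfold Spec_login_usuario; infer_instance

-- ===== CLAIM (what is proved, stated in full; the proofs are below) =====
def Claim_equal_login_usuario : Prop := ∀ (entrada_codigo : List Int), Dom_login_usuario entrada_codigo → Spec_login_usuario entrada_codigo (login_usuario entrada_codigo)

-- ===== LEMMAS AND PROOFS =====

-- proof-side name for B's per-element expression
def pvPeso (n : Int) : Int :=
  if n ≥ 0 then
    2 * (PySem.Int.floordiv n 2) * (PySem.Int.floordiv n 2 + 1)
      + 3 * (PySem.Int.floordiv (n + 1) 2) ^ 2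
  else 0

-- the one step A adds for i = n
def pvG (i : Int) : Int := if PySem.Int.mod i 2 == 0 then i * 2 else i * 3

lemma pvSomatorio_eq_sum (numero : Int) :
    pvSomatorio numero = ((PySem.List.pyRange numero (-1) (-1)).map pvG).sum := by
  unfold pvSomatorio
  have h : (fun (somatorio i : Int) => if PySem.Int.mod i 2 == 0 then somatorio + i * 2 else somatorio + i * 3)
      = fun somatorio i => somatorio + pvG i := by
    funext s i; unfold pvG; split_ifs <;> ring
  rw [h, PySem.List.foldl_add]
  ring

lemma pvPeso_step (n : Int) (hn : 0 ≤ n) : pvPeso n = pvG n + pvPeso (n - 1) := by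
  obtain ⟨q, hq⟩ : ∃ q, n = 2 * q ∨ n = 2 * q + 1 := ⟨n / 2, by omega⟩
  unfold pvPeso pvG
  have hm2 : PySem.Int.mod n 2 = n % 2 := PySem.Int.mod_eq_emod_of_pos (by norm_num)
  have hd : ∀ a : Int, PySem.Int.floordiv a 2 = a / 2 := fun a =>
    PySem.Int.floordiv_eq_ediv_of_pos (by norm_num)
  simp only [hm2, hd]
  rcases hq with h | h
  · subst h
    have hq0 : 0 ≤ q := by omega
    have h1 : 2 * q % 2 = 0 := by omega
    have h2 : 2 * q / 2 = q := by omega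
    have h3 : (2 * q + 1) / 2 = q := by omega
    rcases eq_or_lt_of_le hq0 with h0 | h0
    · simp [← h0]
    · have h4 : (2 * q : Int) ≥ 0 := by omega
      have h5 : (2 * q - 1 : Int) ≥ 0 := by omega
      have h6 : (2 * q - 1) / 2 = q - 1 := by omega
      have h7 : (2 * q - 1 + 1) / 2 = q := by omega
      simp only [h1, h2, h3, h4, h5, h6, h7, if_pos]
      norm_num
      ring
  · subst h
    have h1 : (2 * q + 1) % 2 = 1 := by omega
    have h2 : (2 * q + 1) / 2 = q := by omega
    have h3 : (2 * q + 1 + 1) / 2 = q + 1 := by omega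
    have h4 : (2 * q + 1 : Int) ≥ 0 := by omega
    have h5 : (2 * q + 1 - 1 : Int) ≥ 0 := by omega
    have h6 : (2 * q + 1 - 1) / 2 = q := by omega
    have h7 : (2 * q + 1 - 1 + 1) / 2 = q := by omega
    simp only [h1, h2, h3, h4, h5, h6, h7, if_pos]
    norm_num
    ring

lemma pvSomatorio_eq_pvPeso (numero : Int) : pvSomatorio numero = pvPeso numero := by
  rw [pvSomatorio_eq_sum]
  rcases lt_or_ge numero 0 with hn | hn
  · rw [PySem.List.pyRange_neg_one_eq_nil (by omega)]
    unfold pvPeso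
    rw [if_neg (by omega)]
    simp
  · obtain ⟨m, hm⟩ : ∃ m : Nat, numero = (m : Int) := ⟨numero.toNat, by omega⟩
    subst hm
    induction m with
    | zero => decide
    | succ k ih =>
        have hk : (0 : Int) ≤ (k : Int) := by positivity
        rw [PySem.List.pyRange_neg_one_cons (by push_cast; omega)]
        have he : ((k : Int) + 1) - 1 = (k : Int) := by ring
        push_cast
        rw [he, List.map_cons, List.sum_cons, ih hk,
            pvPeso_step ((k : Int) + 1) (by omega)]
        norm_num

-- ===== VERDICT (by name: the statement is the Claim_ definition above) =====
theorem login_usuario_spec : Claim_equal_login_usuario := by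
  intro entrada _
  unfold Spec_login_usuario login_usuario login_usuario_alt
  rw [PySem.List.foldl_append_singleton_eq_map]
  have : ∀ x : Int, pvSomatorio x = pvPeso x := pvSomatorio_eq_pvPeso
  simp only [List.nil_append]
  exact List.map_congr_left (fun x _ => this x)
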